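-- pv_equiv track=rewrite | github.com/AmruthkiranNM/-Enterprise_Intelligence_Engine | company_discovery/outreach.py | _build_strategic_angle
-- ===== SOURCE A (Python) =====
-- from typing import Dict, Any, List, Optional
--
-- def _build_strategic_angle(
--     dossier: Dict[str, Any],
--     bottlenecks: List[Dict[str, Any]],
-- ) -> str:
--     """Determine the most compelling strategic angle for outreach."""
--     # Prioritize substantive bottlenecks
--     valid_bottlenecks = [b for b in bottlenecks if "No Strategic Bottlenecks" not in b.get("title")]
--
--     if valid_bottlenecks:
--         # Sort by severity
--         sorted_b = sorted(valid_bottlenecks, key=lambda x: {"High": 0, "Medium": 1, "Low": 2}.get(x.get("severity"), 3))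
--         return (
--             f"Optimize {sorted_b[0]['title'].lower()} via {sorted_b[0]['mapped_service']}"
--         )
--
--     return "Optimize operational velocity and scaling efficiency"
-- ===== SOURCE B (Python) =====
-- def _build_strategic_angle(dossier, bottlenecks):
--     """Single pass: skip placeholder bottlenecks and track the best-severity one directly."""
--     rank = {"High": 0, "Medium": 1, "Low": 2}
--     best = None
--     best_rank = 4
--     for b in bottlenecks:
--         if "No Strategic Bottlenecks" in b.get("title"):
--             continue
--         r = rank.get(b.get("severity"), 3)
--         if r < best_rank:
--             best, best_rank = b, r
--     if best is None:
--         return "Optimize operational velocity and scaling efficiency"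
--     return f"Optimize {best['title'].lower()} via {best['mapped_service']}"
-- ===== Notes on version B (the rewrite author's own statement) =====
-- stated objective: simpler
-- what changed: Replaces the filter-comprehension plus full stable sort plus [0] indexing with a single pass over the bottlenecks that skips placeholder entries and tracks the first highest-severity entry with a running minimum.
import Mathlib
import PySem

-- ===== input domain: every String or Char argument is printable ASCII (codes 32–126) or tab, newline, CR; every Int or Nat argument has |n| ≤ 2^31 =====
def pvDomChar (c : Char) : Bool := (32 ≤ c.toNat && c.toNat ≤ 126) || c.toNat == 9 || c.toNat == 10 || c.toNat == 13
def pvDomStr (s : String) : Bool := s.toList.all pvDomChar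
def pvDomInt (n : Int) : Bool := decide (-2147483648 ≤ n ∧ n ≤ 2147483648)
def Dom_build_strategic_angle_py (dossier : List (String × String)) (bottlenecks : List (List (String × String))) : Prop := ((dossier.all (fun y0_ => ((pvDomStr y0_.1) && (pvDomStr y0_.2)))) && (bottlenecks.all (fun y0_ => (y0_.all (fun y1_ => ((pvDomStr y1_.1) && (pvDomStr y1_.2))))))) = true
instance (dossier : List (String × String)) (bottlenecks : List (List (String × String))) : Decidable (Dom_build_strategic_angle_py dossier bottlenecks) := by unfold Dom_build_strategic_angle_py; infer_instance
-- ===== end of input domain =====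

-- B replaces filter + full stable sort + [0] with one pass over the bottlenecks that
-- skips placeholders and tracks the first best-severity entry (objective: simpler; return value only).

-- first-match association lookup: Python dict .get(k) on a dict given as an assoc list
def pvGet? (d : List (String × String)) (k : String) : Option String :=
  match d with
  | [] => none
  | (a, b) :: t => if a = k then some b else pvGet? t k

-- {"High": 0, "Medium": 1, "Low": 2}.get(sev, 3)
def pvRank (sev : Option String) : Int :=
  match sev with
  | some "High" => 0
  | some "Medium" => 1
  | some "Low" => 2
  | _ => 3

-- ===== PORT A =====
def build_strategic_angle_py (dossier : List (String × String)) (bottlenecks : List (List (String × String))) : String :=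
  let valid := bottlenecks.filter (fun b => !(PySem.Str.isIn "No Strategic Bottlenecks" ((pvGet? b "title").getD "")))
  if valid ≠ [] then
    let sorted_b := PySem.List.sorted valid (fun x => pvRank (pvGet? x "severity")) false
    match sorted_b with
    | b0 :: _ => "Optimize " ++ PySem.Str.lower ((pvGet? b0 "title").getD "") ++ " via " ++ (pvGet? b0 "mapped_service").getD ""
    | [] => ""  -- unreachable: valid ≠ []
  else
    "Optimize operational velocity and scaling efficiency"

-- ===== PORT B =====
def pvStepB (acc : Option (List (String × String)) × Int) (b : List (String × String)) :
    Option (List (String × String)) × Int :=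
  if PySem.Str.isIn "No Strategic Bottlenecks" ((pvGet? b "title").getD "") then acc
  else
    let r := pvRank (pvGet? b "severity")
    if r < acc.2 then (some b, r) else acc

def build_strategic_angle_py_alt (dossier : List (String × String)) (bottlenecks : List (List (String × String))) : String :=
  let st := bottlenecks.foldl pvStepB (none, 4)
  match st.1 with
  | none => "Optimize operational velocity and scaling efficiency"
  | some best => "Optimize " ++ PySem.Str.lower ((pvGet? best "title").getD "") ++ " via " ++ (pvGet? best "mapped_service").getD ""

-- ===== PRECONDITION & SPEC =====
-- Pre_ excludes inputs on which the Python raises: a bottleneck without a "title" key makes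
-- A's membership test run on None (TypeError), and a substantive bottleneck without a
-- "mapped_service" key can make the final ['mapped_service'] lookup raise KeyError (Pre_
-- conservatively requires the key on every substantive bottleneck, not only the selected one).
def Pre_build_strategic_angle_py (dossier : List (String × String)) (bottlenecks : List (List (String × String))) : Prop :=
  ∀ b ∈ bottlenecks, "title" ∈ b.map Prod.fst ∧
    (PySem.Str.isIn "No Strategic Bottlenecks" ((pvGet? b "title").getD "") = false →
      "mapped_service" ∈ b.map Prod.fst)
instance (dossier : List (String × String)) (bottlenecks : List (List (String × String))) : Decidable (Pre_build_strategic_angle_py dossier bottlenecks) := by unfold Pre_build_strategic_angle_py; infer_instance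

def pvWitness_build_strategic_angle_py : (List (String × String)) × (List (List (String × String))) :=
  ([("company", "Acme")],
   [[("title", "Manual Reporting"), ("severity", "Low"), ("mapped_service", "BI Automation")],
    [("title", "Slow CI"), ("severity", "High"), ("mapped_service", "DevOps Audit")]])

def Spec_build_strategic_angle_py (dossier : List (String × String)) (bottlenecks : List (List (String × String))) (out : String) : Prop := out = build_strategic_angle_py_alt dossier bottlenecks
instance (dossier : List (String × String)) (bottlenecks : List (List (String × String))) (out : String) : Decidable (Spec_build_strategic_angle_py dossier bottlenecks out) := by unfold Spec_build_strategic_angle_py; infer_instance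

-- ===== CLAIM (what is proved, stated in full; the proofs are below) =====
def Claim_equal_build_strategic_angle_py : Prop := ∀ (dossier : List (String × String)) (bottlenecks : List (List (String × String))), Dom_build_strategic_angle_py dossier bottlenecks → Pre_build_strategic_angle_py dossier bottlenecks → Spec_build_strategic_angle_py dossier bottlenecks (build_strategic_angle_py dossier bottlenecks)

-- ===== LEMMAS AND PROOFS =====

-- the running minimum over a plain list (shared characterisation of both programs)
def pvFmin (m : List (String × String)) (l : List (List (String × String))) : List (String × String) :=
  l.foldl (fun m x => if pvRank (pvGet? x "severity") < pvRank (pvGet? m "severity") then x else m) m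

theorem pvRank_lt_four (o : Option String) : pvRank o < 4 := by
  unfold pvRank; split <;> norm_num

-- B's guarded fold over the whole list = running minimum over the filtered list
theorem pvStepB_foldl_some (l : List (List (String × String))) (m : List (String × String)) :
    l.foldl pvStepB (some m, pvRank (pvGet? m "severity")) =
      (some (pvFmin m (l.filter (fun b => !(PySem.Str.isIn "No Strategic Bottlenecks" ((pvGet? b "title").getD ""))))),
       pvRank (pvGet? (pvFmin m (l.filter (fun b => !(PySem.Str.isIn "No Strategic Bottlenecks" ((pvGet? b "title").getD ""))))) "severity")) := by
  induction l generalizing m with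
  | nil => rfl
  | cons b t ih =>
      by_cases hb : PySem.Str.isIn "No Strategic Bottlenecks" ((pvGet? b "title").getD "") = true
      · simp only [List.foldl_cons, pvStepB, hb, if_true, List.filter_cons, Bool.not_true,
          Bool.false_eq_true, if_false, ih]
      · simp only [Bool.not_eq_true] at hb
        by_cases hr : pvRank (pvGet? b "severity") < pvRank (pvGet? m "severity")
        · simp only [List.foldl_cons, pvStepB, hb, Bool.false_eq_true, if_false, hr, if_true,
            List.filter_cons, Bool.not_false, pvFmin, List.foldl_cons] at *
          exact ih b
        · simp only [List.foldl_cons, pvStepB, hb, Bool.false_eq_true, if_false,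
            List.filter_cons, Bool.not_false, if_true, pvFmin, List.foldl_cons] at *
          rw [if_neg hr, if_neg hr]; exact ih m

theorem pvStepB_foldl_none (l : List (List (String × String))) :
    l.foldl pvStepB (none, 4) =
      (match l.filter (fun b => !(PySem.Str.isIn "No Strategic Bottlenecks" ((pvGet? b "title").getD ""))) with
       | [] => (none, 4)
       | v :: t => (some (pvFmin v t), pvRank (pvGet? (pvFmin v t) "severity"))) := by
  induction l with
  | nil => rfl
  | cons b t ih =>
      by_cases hb : PySem.Str.isIn "No Strategic Bottlenecks" ((pvGet? b "title").getD "") = true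
      · simp only [List.foldl_cons, pvStepB, hb, if_true, List.filter_cons, Bool.not_true,
          Bool.false_eq_true, if_false]
        exact ih
      · simp only [Bool.not_eq_true] at hb
        have h4 : pvRank (pvGet? b "severity") < 4 := pvRank_lt_four _
        simp only [List.foldl_cons, pvStepB, hb, Bool.false_eq_true, if_false, if_pos h4,
          List.filter_cons, Bool.not_false, if_true]
        exact pvStepB_foldl_some t b

-- head of the stable insertion sort = running minimum (strict-< insertion keeps the first minimum first)
theorem pv_head_insertBy (x : List (String × String)) (acc : List (List (String × String)))
    (h : List (String × String)) (hh : acc.head? = some h) :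
    (PySem.List.insertBy (fun a b => decide (pvRank (pvGet? a "severity") < pvRank (pvGet? b "severity"))) x acc).head? =
      some (if pvRank (pvGet? x "severity") < pvRank (pvGet? h "severity") then x else h) := by
  cases acc with
  | nil => simp at hh
  | cons y ys =>
      simp only [List.head?_cons, Option.some.injEq] at hh
      subst hh
      by_cases hr : pvRank (pvGet? x "severity") < pvRank (pvGet? y "severity")
      · simp [PySem.List.insertBy, hr]
      · simp [PySem.List.insertBy, hr]

theorem pv_head_foldl_insertBy (l : List (List (String × String)))
    (acc : List (List (String × String))) (h : List (String × String)) (hh : acc.head? = some h) :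
    (l.foldl (fun acc x => PySem.List.insertBy (fun a b => decide (pvRank (pvGet? a "severity") < pvRank (pvGet? b "severity"))) x acc) acc).head? =
      some (pvFmin h l) := by
  induction l generalizing acc h with
  | nil => simpa [pvFmin] using hh
  | cons x t ih =>
      have h1 := pv_head_insertBy x acc h hh
      simp only [List.foldl_cons]
      rw [ih _ _ h1]
      by_cases hr : pvRank (pvGet? x "severity") < pvRank (pvGet? h "severity") <;>
        simp [pvFmin, hr]

theorem pv_head_sorted (v : List (String × String)) (t : List (List (String × String))) :
    (PySem.List.sorted (v :: t) (fun x => pvRank (pvGet? x "severity")) false).head? = some (pvFmin v t) := by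
  rw [PySem.List.sorted_eq_foldl_insertBy]
  simp only [List.foldl_cons]
  exact pv_head_foldl_insertBy t _ v (by simp [PySem.List.insertBy])

-- ===== VERDICT (by name: the statement is the Claim_ definition above) =====
theorem build_strategic_angle_py_spec : Claim_equal_build_strategic_angle_py := by
  intro dossier bottlenecks _ _
  unfold Spec_build_strategic_angle_py build_strategic_angle_py build_strategic_angle_py_alt
  rw [pvStepB_foldl_none]
  cases hv : bottlenecks.filter (fun b => !(PySem.Str.isIn "No Strategic Bottlenecks" ((pvGet? b "title").getD ""))) with
  | nil => simp
  | cons v t =>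
      have hhead := pv_head_sorted v t
      cases hs : PySem.List.sorted (v :: t) (fun x => pvRank (pvGet? x "severity")) false with
      | nil => rw [hs] at hhead; simp at hhead
      | cons b0 rest =>
          rw [hs] at hhead
          simp only [List.head?_cons, Option.some.injEq] at hhead
          simp [hs, hhead]
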